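-- pv_equiv track=rewrite | github.com/ijaffrey/claw_contractor | conversation_manager.py | determine_next_step
-- ===== SOURCE A (Python) =====
-- def determine_next_step(lead, conversation_history, customer_reply):
--     """
--     Determine the next qualification step based on context
--
--     Args:
--         lead: Lead record from database
--         conversation_history: List of conversation messages
--         customer_reply: Latest reply from customer
--
--     Returns:
--         int: Next step number (or same step if info not collected)
--     """
--     current_step = lead.get('qualification_step', 1)
--
--     # Step 1: Urgency
--     if current_step == 1:
--         # Check if customer mentioned urgency in their reply
--         reply_lower = customer_reply.lower()
--         urgency_keywords = {
--             'emergency': ['emergency', 'urgent', 'asap', 'immediately', 'flooding', 'burst'],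
--             'soon': ['soon', 'today', 'tomorrow', 'this week', 'quickly', 'fast'],
--             'planning': ['planning', 'estimate', 'quote', 'when you can', 'no rush', 'flexible']
--         }
--
--         # If they mentioned urgency, move to step 2
--         for category, keywords in urgency_keywords.items():
--             if any(keyword in reply_lower for keyword in keywords):
--                 return 2
--
--         # Otherwise stay on step 1 and ask again
--         return 1
--
--     # Step 2: Job details
--     elif current_step == 2:
--         # If they provided details (response > 20 chars), move forward
--         if len(customer_reply.strip()) > 20:
--             return 3
--         return 2
--
--     # Step 3: Location
--     elif current_step == 3:
--         # Look for address indicators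
--         reply_lower = customer_reply.lower()
--         address_indicators = ['street', 'st', 'ave', 'avenue', 'road', 'rd', 'drive', 'dr', 'lane', 'ln', 'boulevard', 'blvd']
--
--         if any(indicator in reply_lower for indicator in address_indicators) or len(customer_reply.strip()) > 15:
--             return 4
--         return 3
--
--     # Step 4: Photos
--     elif current_step == 4:
--         # Move to step 5 after asking for photos
--         # (we'll assume they'll send photos or say they can't)
--         return 5
--
--     # Step 5: Availability
--     elif current_step == 5:
--         # If they mentioned times/days, move to final step
--         reply_lower = customer_reply.lower()
--         time_indicators = [
--             'morning', 'afternoon', 'evening', 'monday', 'tuesday', 'wednesday', 'thursday',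
--             'friday', 'saturday', 'sunday', 'weekday', 'weekend', 'am', 'pm',
--             'today', 'tomorrow', 'week', 'anytime', 'flexible'
--         ]
--
--         if any(indicator in reply_lower for indicator in time_indicators) or len(customer_reply.strip()) > 10:
--             return 6
--         return 5
--
--     # Step 6: Ready for contractor
--     elif current_step == 6:
--         # Stay at step 6 - this is the final step
--         return 6
--
--     return current_step
-- ===== SOURCE B (Python) =====
-- # Different algorithm: one left-to-right scan over the lowered reply testing which
-- # step keywords START at each position (multi-pattern position scan), instead of a
-- # per-keyword substring search; the successor step is computed as step + 1.
--
-- KEYWORDS = {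
--     1: ['emergency', 'urgent', 'asap', 'immediately', 'flooding', 'burst',
--         'soon', 'today', 'tomorrow', 'this week', 'quickly', 'fast',
--         'planning', 'estimate', 'quote', 'when you can', 'no rush', 'flexible'],
--     3: ['street', 'st', 'ave', 'avenue', 'road', 'rd', 'drive', 'dr',
--         'lane', 'ln', 'boulevard', 'blvd'],
--     5: ['morning', 'afternoon', 'evening', 'monday', 'tuesday', 'wednesday',
--         'thursday', 'friday', 'saturday', 'sunday', 'weekday', 'weekend',
--         'am', 'pm', 'today', 'tomorrow', 'week', 'anytime', 'flexible'],
-- }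
--
-- THRESHOLDS = {2: 20, 3: 15, 4: -1, 5: 10}
--
--
-- def determine_next_step(lead, conversation_history, customer_reply):
--     step = lead.get('qualification_step', 1)
--     if not 1 <= step <= 5:
--         return step
--     text = customer_reply.lower()
--     kws = KEYWORDS.get(step, [])
--     hit = False
--     for i in range(len(text)):
--         if any(text.startswith(kw, i) for kw in kws):
--             hit = True
--             break
--     if not hit:
--         t = THRESHOLDS.get(step)
--         hit = t is not None and len(customer_reply.strip()) > t
--     return step + 1 if hit else step
-- ===== Notes on version B (the rewrite author's own statement) =====
-- stated objective: alternative
-- what changed: Replaced A's per-step if/elif chain of per-keyword substring ('in') searches by a single left-to-right scan over the lowered reply that tests at each position whether any of the current step's keywords starts there, with the successor computed arithmetically as step+1 under a 1<=step<=5 guard and the length thresholds held in one table.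
import Mathlib
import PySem

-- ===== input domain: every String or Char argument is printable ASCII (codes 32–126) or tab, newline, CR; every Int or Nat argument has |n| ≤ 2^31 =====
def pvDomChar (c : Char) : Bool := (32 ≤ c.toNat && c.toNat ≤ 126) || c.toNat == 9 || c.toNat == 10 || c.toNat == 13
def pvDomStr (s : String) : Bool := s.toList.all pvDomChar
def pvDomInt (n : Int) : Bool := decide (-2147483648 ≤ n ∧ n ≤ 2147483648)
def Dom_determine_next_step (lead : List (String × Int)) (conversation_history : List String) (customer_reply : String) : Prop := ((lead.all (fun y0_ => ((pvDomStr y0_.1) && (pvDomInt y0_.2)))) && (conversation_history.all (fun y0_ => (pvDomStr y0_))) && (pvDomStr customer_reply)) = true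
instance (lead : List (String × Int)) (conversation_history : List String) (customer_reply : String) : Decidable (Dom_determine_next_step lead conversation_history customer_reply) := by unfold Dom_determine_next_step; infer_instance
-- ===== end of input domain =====

-- B replaces A's per-step chain of per-keyword substring searches by one position scan
-- over the lowered reply (which keywords start where), with successor = step + 1 (objective: alternative).


-- ===== PORT A =====
def determine_next_step (lead : List (String × Int)) (conversation_history : List String) (customer_reply : String) : Int :=
  let current_step := (PySem.Dict.mk lead).getD "qualification_step" 1
  if current_step = 1 then
    let reply_lower := PySem.Str.lower customer_reply
    -- for category, keywords in urgency_keywords.items(): if any(...): return 2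
    if ["emergency", "urgent", "asap", "immediately", "flooding", "burst"].any
        (fun k => PySem.Str.isIn k reply_lower) then 2
    else if ["soon", "today", "tomorrow", "this week", "quickly", "fast"].any
        (fun k => PySem.Str.isIn k reply_lower) then 2
    else if ["planning", "estimate", "quote", "when you can", "no rush", "flexible"].any
        (fun k => PySem.Str.isIn k reply_lower) then 2
    else 1
  else if current_step = 2 then
    if PySem.Str.len (PySem.Str.strip customer_reply) > 20 then 3 else 2
  else if current_step = 3 then
    let reply_lower := PySem.Str.lower customer_reply
    if ["street", "st", "ave", "avenue", "road", "rd", "drive", "dr", "lane", "ln", "boulevard", "blvd"].any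
        (fun k => PySem.Str.isIn k reply_lower)
       || decide (PySem.Str.len (PySem.Str.strip customer_reply) > 15) then 4
    else 3
  else if current_step = 4 then
    5
  else if current_step = 5 then
    let reply_lower := PySem.Str.lower customer_reply
    if ["morning", "afternoon", "evening", "monday", "tuesday", "wednesday", "thursday",
        "friday", "saturday", "sunday", "weekday", "weekend", "am", "pm",
        "today", "tomorrow", "week", "anytime", "flexible"].any
        (fun k => PySem.Str.isIn k reply_lower)
       || decide (PySem.Str.len (PySem.Str.strip customer_reply) > 10) then 6
    else 5
  else if current_step = 6 then
    6
  else current_step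

-- ===== PORT B =====
def pvKeywords : List (Int × List String) :=
  [ (1, ["emergency", "urgent", "asap", "immediately", "flooding", "burst",
         "soon", "today", "tomorrow", "this week", "quickly", "fast",
         "planning", "estimate", "quote", "when you can", "no rush", "flexible"]),
    (3, ["street", "st", "ave", "avenue", "road", "rd", "drive", "dr",
         "lane", "ln", "boulevard", "blvd"]),
    (5, ["morning", "afternoon", "evening", "monday", "tuesday", "wednesday",
         "thursday", "friday", "saturday", "sunday", "weekday", "weekend",
         "am", "pm", "today", "tomorrow", "week", "anytime", "flexible"]) ]

def pvThresholds : List (Int × Int) := [(2, 20), (3, 15), (4, -1), (5, 10)]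

def determine_next_step_alt (lead : List (String × Int)) (conversation_history : List String) (customer_reply : String) : Int :=
  let step := (PySem.Dict.mk lead).getD "qualification_step" 1
  if ¬ (1 ≤ step ∧ step ≤ 5) then step
  else
    let text := PySem.Str.lower customer_reply
    let kws := (PySem.Dict.mk pvKeywords).getD step []
    -- for i in range(len(text)): if any(text.startswith(kw, i) for kw in kws): hit
    -- text.startswith(kw, i) with 0 ≤ i is exactly startswith on the slice text[i:]
    let hit := (PySem.List.pyRange 0 (PySem.Str.len text) 1).any (fun i =>
        kws.any (fun kw => PySem.Str.startswith (PySem.Str.slice text (some i) none) kw))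
    let hit2 := hit || (match (PySem.Dict.mk pvThresholds).get? step with
        | none => false
        | some t => decide (PySem.Str.len (PySem.Str.strip customer_reply) > t))
    if hit2 then step + 1 else step

-- ===== PRECONDITION & SPEC =====
def Spec_determine_next_step (lead : List (String × Int)) (conversation_history : List String) (customer_reply : String) (out : Int) : Prop := out = determine_next_step_alt lead conversation_history customer_reply
instance (lead : List (String × Int)) (conversation_history : List String) (customer_reply : String) (out : Int) : Decidable (Spec_determine_next_step lead conversation_history customer_reply out) := by unfold Spec_determine_next_step; infer_instance

-- ===== CLAIM (what is proved, stated in full; the proofs are below) =====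
def Claim_equal_determine_next_step : Prop := ∀ (lead : List (String × Int)) (conversation_history : List String) (customer_reply : String), Dom_determine_next_step lead conversation_history customer_reply → Spec_determine_next_step lead conversation_history customer_reply (determine_next_step lead conversation_history customer_reply)

-- ===== LEMMAS AND PROOFS =====

-- a nonempty pattern is an infix of L iff it is a prefix of some proper-position suffix of L
theorem prefix_drop_iff_infix (kw L : List Char) (h : kw ≠ []) :
    (∃ k, k < L.length ∧ kw <+: L.drop k) ↔ kw <:+: L := by
  constructor
  · rintro ⟨k, _, r, hr⟩
    exact ⟨L.take k, r, by rw [List.append_assoc, hr, List.take_append_drop]⟩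
  · rintro ⟨u, t, hut⟩
    refine ⟨u.length, ?_, t, ?_⟩
    · have := congrArg List.length hut
      simp [List.length_append] at this
      cases kw with
      | nil => exact absurd rfl h
      | cons c cs => simp at this; omega
    · rw [← hut, List.append_assoc, List.drop_left]

-- the position-scan matcher of B equals the per-keyword substring search of A
theorem scan_eq_anyIn (kws : List String) (s : String)
    (h : ∀ kw ∈ kws, kw.toList ≠ []) :
    ((PySem.List.pyRange 0 (PySem.Str.len s) 1).any (fun i =>
        kws.any (fun kw => PySem.Str.startswith (PySem.Str.slice s (some i) none) kw)))
    = kws.any (fun kw => PySem.Str.isIn kw s) := by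
  rw [Bool.eq_iff_iff]
  simp only [List.any_eq_true]
  constructor
  · rintro ⟨i, hi, kw, hkw, hsw⟩
    refine ⟨kw, hkw, ?_⟩
    rw [PySem.List.mem_pyRange_one] at hi
    obtain ⟨k, rfl⟩ : ∃ k : Nat, (k : Int) = i := ⟨i.toNat, Int.toNat_of_nonneg hi.1⟩
    rw [show PySem.Str.startswith (PySem.Str.slice s (some (k:Int)) none) kw
        = kw.toList.isPrefixOf (s.toList.drop k) by
      simp [PySem.Str.startswith, PySem.Str.slice, PySem.Chars.startswith, PySem.Chars.slice,
        PySem.List.slice_from_natCast]] at hsw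
    rw [List.isPrefixOf_iff_prefix] at hsw
    rw [PySem.Str.isIn, PySem.Chars.isIn_iff_infix]
    rw [PySem.Str.len_eq] at hi
    exact (prefix_drop_iff_infix kw.toList s.toList (h kw hkw)).mp
      ⟨k, by exact_mod_cast hi.2, hsw⟩
  · rintro ⟨kw, hkw, hin⟩
    rw [PySem.Str.isIn, PySem.Chars.isIn_iff_infix] at hin
    obtain ⟨k, hk, hpre⟩ := (prefix_drop_iff_infix kw.toList s.toList (h kw hkw)).mpr hin
    refine ⟨(k : Int), ?_, kw, hkw, ?_⟩
    · rw [PySem.List.mem_pyRange_one, PySem.Str.len_eq]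
      exact ⟨Int.natCast_nonneg k, by exact_mod_cast hk⟩
    · rw [show PySem.Str.startswith (PySem.Str.slice s (some (k:Int)) none) kw
        = kw.toList.isPrefixOf (s.toList.drop k) by
        simp [PySem.Str.startswith, PySem.Str.slice, PySem.Chars.startswith, PySem.Chars.slice,
          PySem.List.slice_from_natCast]]
      exact List.isPrefixOf_iff_prefix.mpr hpre

-- A's three sequential keyword-group tests equal one test of the concatenated list
theorem chain_eq (p : String → Bool) (l1 l2 l3 : List String) :
    (if l1.any p then (2 : Int) else if l2.any p then 2 else if l3.any p then 2 else 1)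
      = (if (l1 ++ l2 ++ l3).any p then 2 else 1) := by
  cases h1 : l1.any p <;> cases h2 : l2.any p <;> cases h3 : l3.any p <;>
    simp [List.any_append, h1, h2, h3]

theorem determine_next_step_spec : Claim_equal_determine_next_step := by
  intro lead conversation_history customer_reply _
  show determine_next_step lead conversation_history customer_reply
    = determine_next_step_alt lead conversation_history customer_reply
  simp only [determine_next_step, determine_next_step_alt]
  obtain ⟨s, hs⟩ : ∃ s, (PySem.Dict.mk lead).getD "qualification_step" 1 = s := ⟨_, rfl⟩
  rw [hs]
  by_cases h1 : s = 1
  · subst h1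
    rw [if_pos rfl, if_neg (by omega : ¬ ¬ ((1:Int) ≤ 1 ∧ (1:Int) ≤ 5))]
    rw [show (PySem.Dict.mk pvKeywords).getD 1 []
      = ["emergency", "urgent", "asap", "immediately", "flooding", "burst",
         "soon", "today", "tomorrow", "this week", "quickly", "fast",
         "planning", "estimate", "quote", "when you can", "no rush", "flexible"] from rfl,
      show (PySem.Dict.mk pvThresholds).get? 1 = none from rfl]
    rw [scan_eq_anyIn _ _ (by decide)]
    simpa using chain_eq (fun k => PySem.Str.isIn k (PySem.Str.lower customer_reply))
      ["emergency", "urgent", "asap", "immediately", "flooding", "burst"]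
      ["soon", "today", "tomorrow", "this week", "quickly", "fast"]
      ["planning", "estimate", "quote", "when you can", "no rush", "flexible"]
  by_cases h2 : s = 2
  · subst h2
    rw [if_neg h1, if_pos rfl, if_neg (by omega : ¬ ¬ ((1:Int) ≤ 2 ∧ (2:Int) ≤ 5))]
    rw [show (PySem.Dict.mk pvKeywords).getD 2 [] = [] from rfl,
      show (PySem.Dict.mk pvThresholds).get? 2 = some 20 from rfl]
    by_cases h : PySem.Str.len (PySem.Str.strip customer_reply) > 20 <;> simp [h]
  by_cases h3 : s = 3
  · subst h3
    rw [if_neg h1, if_neg h2, if_pos rfl, if_neg (by omega : ¬ ¬ ((1:Int) ≤ 3 ∧ (3:Int) ≤ 5))]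
    rw [show (PySem.Dict.mk pvKeywords).getD 3 []
      = ["street", "st", "ave", "avenue", "road", "rd", "drive", "dr",
         "lane", "ln", "boulevard", "blvd"] from rfl,
      show (PySem.Dict.mk pvThresholds).get? 3 = some 15 from rfl]
    rw [scan_eq_anyIn _ _ (by decide)]
    norm_num
  by_cases h4 : s = 4
  · subst h4
    rw [if_neg h1, if_neg h2, if_neg h3, if_pos rfl,
      if_neg (by omega : ¬ ¬ ((1:Int) ≤ 4 ∧ (4:Int) ≤ 5))]
    rw [show (PySem.Dict.mk pvKeywords).getD 4 [] = [] from rfl,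
      show (PySem.Dict.mk pvThresholds).get? 4 = some (-1) from rfl]
    simp only [PySem.Str.len_eq]
    simp
    omega
  by_cases h5 : s = 5
  · subst h5
    rw [if_neg h1, if_neg h2, if_neg h3, if_neg h4, if_pos rfl,
      if_neg (by omega : ¬ ¬ ((1:Int) ≤ 5 ∧ (5:Int) ≤ 5))]
    rw [show (PySem.Dict.mk pvKeywords).getD 5 []
      = ["morning", "afternoon", "evening", "monday", "tuesday", "wednesday",
         "thursday", "friday", "saturday", "sunday", "weekday", "weekend",
         "am", "pm", "today", "tomorrow", "week", "anytime", "flexible"] from rfl,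
      show (PySem.Dict.mk pvThresholds).get? 5 = some 10 from rfl]
    rw [scan_eq_anyIn _ _ (by decide)]
    norm_num
  by_cases h6 : s = 6
  · subst h6
    rw [if_neg h1, if_neg h2, if_neg h3, if_neg h4, if_neg h5, if_pos rfl,
      if_pos (by omega : ¬ ((1:Int) ≤ 6 ∧ (6:Int) ≤ 5))]
  · rw [if_neg h1, if_neg h2, if_neg h3, if_neg h4, if_neg h5, if_neg h6]
    have : ¬ ((1:Int) ≤ s ∧ s ≤ 5) := by omega
    rw [if_pos this]
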